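-- pv_equiv track=rewrite | github.com/kamal81684/ai-recruit | resume-shortlisting-assistant/intelligence_question_generator.py | _are_skills_related
-- ===== SOURCE A (Python) =====
-- def _are_skills_related(skill1: str, skill2: str) -> bool:
--     """
--     Check if two skills might be related.
--
--     Args:
--         skill1: First skill
--         skill2: Second skill
--
--     Returns:
--         True if skills might be related
--     """
--     # Framework relationships
--     framework_groups = [
--         {'react', 'next.js', 'gatsby', 'vue', 'angular', 'svelte'},
--         {'node.js', 'express', 'koa', 'nest.js'},
--         {'django', 'flask', 'fastapi'},
--         {'tensorflow', 'pytorch', 'keras'},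
--         {'aws', 'azure', 'gcp'},
--     ]
--
--     for group in framework_groups:
--         if skill1.lower() in group and skill2.lower() in group:
--             return True
--
--     return False
-- ===== SOURCE B (Python) =====
-- # B: precompute an inverted index (skill -> group id) once; the comparison is two dict lookups,
-- # no scan over the groups at call time.
--
-- _FRAMEWORK_GROUPS = (
--     ('react', 'next.js', 'gatsby', 'vue', 'angular', 'svelte'),
--     ('node.js', 'express', 'koa', 'nest.js'),
--     ('django', 'flask', 'fastapi'),
--     ('tensorflow', 'pytorch', 'keras'),
--     ('aws', 'azure', 'gcp'),
-- )
--
-- _SKILL_TO_GROUP = {}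
-- for _i, _grp in enumerate(_FRAMEWORK_GROUPS):
--     for _s in _grp:
--         _SKILL_TO_GROUP[_s] = _i
--
--
-- def _are_skills_related(skill1: str, skill2: str) -> bool:
--     g1 = _SKILL_TO_GROUP.get(skill1.lower())
--     return g1 is not None and g1 == _SKILL_TO_GROUP.get(skill2.lower())
-- ===== Notes on version B (the rewrite author's own statement) =====
-- stated objective: alternative
-- what changed: B precomputes once an inverted index dict mapping each skill to its group id, so the call body is two dict lookups (with a None guard) instead of A's scan over the five groups.
import Mathlib
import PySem

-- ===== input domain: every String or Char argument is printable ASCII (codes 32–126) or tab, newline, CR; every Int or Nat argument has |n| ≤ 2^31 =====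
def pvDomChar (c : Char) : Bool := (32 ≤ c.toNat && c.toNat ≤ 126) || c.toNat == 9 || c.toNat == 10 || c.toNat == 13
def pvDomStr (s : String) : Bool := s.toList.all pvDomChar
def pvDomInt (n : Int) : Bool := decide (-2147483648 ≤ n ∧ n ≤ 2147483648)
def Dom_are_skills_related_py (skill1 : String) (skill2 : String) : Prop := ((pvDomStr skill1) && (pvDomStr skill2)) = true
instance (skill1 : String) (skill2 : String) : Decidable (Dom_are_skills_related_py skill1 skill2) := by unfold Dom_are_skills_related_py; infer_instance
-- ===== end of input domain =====

-- B replaces A's per-call scan over the five framework groups by one precomputed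
-- inverted index (skill -> group id) and two dict lookups; return values are equal.

-- ===== PORT A =====
def pvFrameworkGroups : List (PySem.Set String) :=
  [PySem.Set.ofList ["react", "next.js", "gatsby", "vue", "angular", "svelte"],
   PySem.Set.ofList ["node.js", "express", "koa", "nest.js"],
   PySem.Set.ofList ["django", "flask", "fastapi"],
   PySem.Set.ofList ["tensorflow", "pytorch", "keras"],
   PySem.Set.ofList ["aws", "azure", "gcp"]]

-- the 'for group in framework_groups' loop with its early return
def pvGroupLoop (skill1 skill2 : String) : List (PySem.Set String) → Bool
  | [] => false
  | g :: rest =>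
      if PySem.Set.contains g (PySem.Str.lower skill1) && PySem.Set.contains g (PySem.Str.lower skill2) then
        true
      else pvGroupLoop skill1 skill2 rest

def are_skills_related_py (skill1 : String) (skill2 : String) : Bool :=
  pvGroupLoop skill1 skill2 pvFrameworkGroups

-- ===== PORT B =====
def pvFrameworkGroupsB : List (List String) :=
  [["react", "next.js", "gatsby", "vue", "angular", "svelte"],
   ["node.js", "express", "koa", "nest.js"],
   ["django", "flask", "fastapi"],
   ["tensorflow", "pytorch", "keras"],
   ["aws", "azure", "gcp"]]

-- the module-level index build: for _i, _grp in enumerate(...): for _s in _grp: d[_s] = _i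
def pvSkillToGroup : PySem.Dict String Int :=
  (PySem.List.enumerate pvFrameworkGroupsB).foldl
    (fun d p => p.2.foldl (fun d s => d.insert s p.1) d) PySem.Dict.empty

def are_skills_related_py_alt (skill1 : String) (skill2 : String) : Bool :=
  let g1 := pvSkillToGroup.get? (PySem.Str.lower skill1)
  g1.isSome && (g1 == pvSkillToGroup.get? (PySem.Str.lower skill2))

-- ===== PRECONDITION & SPEC =====
def Spec_are_skills_related_py (skill1 : String) (skill2 : String) (out : Bool) : Prop := out = are_skills_related_py_alt skill1 skill2
instance (skill1 : String) (skill2 : String) (out : Bool) : Decidable (Spec_are_skills_related_py skill1 skill2 out) := by unfold Spec_are_skills_related_py; infer_instance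

-- ===== CLAIM (what is proved, stated in full; the proofs are below) =====
def Claim_equal_are_skills_related_py : Prop := ∀ (skill1 : String) (skill2 : String), Dom_are_skills_related_py skill1 skill2 → Spec_are_skills_related_py skill1 skill2 (are_skills_related_py skill1 skill2)

-- ===== LEMMAS AND PROOFS =====

-- the 21 skill names; any other string is in no group and has no index entry
def pvAllSkills : List String :=
  ["react", "next.js", "gatsby", "vue", "angular", "svelte",
   "node.js", "express", "koa", "nest.js",
   "django", "flask", "fastapi",
   "tensorflow", "pytorch", "keras",
   "aws", "azure", "gcp"]

-- A's early-return loop is an 'any' over the groups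
lemma pvGroupLoop_eq_any (s1 s2 : String) (gs : List (PySem.Set String)) :
    pvGroupLoop s1 s2 gs =
      gs.any (fun g => PySem.Set.contains g (PySem.Str.lower s1) &&
                       PySem.Set.contains g (PySem.Str.lower s2)) := by
  induction gs with
  | nil => rfl
  | cons g rest ih =>
      rw [List.any_cons, ← ih]
      simp only [pvGroupLoop]
      split_ifs with h
      · rw [h, Bool.true_or]
      · rw [Bool.eq_false_iff.mpr h, Bool.false_or]

-- every skill occurring in a group is one of the 21 names
lemma pv_groups_sub : ∀ g ∈ pvFrameworkGroups, ∀ x ∈ (g : List String), x ∈ pvAllSkills := by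
  decide

-- the index's keys are exactly the 21 names
lemma pv_keys_eq : pvSkillToGroup.items.map Prod.fst = pvAllSkills := by decide

-- a string outside the 21 names has no index entry
lemma pv_notin_get? (t : String) (h : t ∉ pvAllSkills) : pvSkillToGroup.get? t = none := by
  show (List.find? (fun p => p.1 == t) pvSkillToGroup.items).map _ = none
  rw [List.find?_eq_none.mpr]
  · rfl
  · intro p hp hpt
    have hmem : p.1 ∈ pvAllSkills := pv_keys_eq ▸ List.mem_map_of_mem hp
    exact h ((eq_of_beq hpt) ▸ hmem)

-- a string outside the 21 names is in no group (left operand)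
lemma pv_notin_any (t u : String) (h : t ∉ pvAllSkills) :
    pvFrameworkGroups.any (fun g => PySem.Set.contains g t && PySem.Set.contains g u) = false := by
  rw [List.any_eq_false]
  intro g hg hgte
  obtain ⟨hct, -⟩ := Bool.and_eq_true_iff.mp hgte
  exact h (pv_groups_sub g hg t ((PySem.Set.contains_iff g t).mp hct))

-- the same for the right operand
lemma pv_notin_any' (t u : String) (h : u ∉ pvAllSkills) :
    pvFrameworkGroups.any (fun g => PySem.Set.contains g t && PySem.Set.contains g u) = false := by
  rw [List.any_eq_false]
  intro g hg hgte
  obtain ⟨-, hcu⟩ := Bool.and_eq_true_iff.mp hgte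
  exact h (pv_groups_sub g hg u ((PySem.Set.contains_iff g u).mp hcu))

-- A's scan and B's two index lookups agree on every pair of (lowered) strings
set_option maxHeartbeats 2000000 in
lemma pv_key (t1 t2 : String) :
    pvFrameworkGroups.any (fun g => PySem.Set.contains g t1 && PySem.Set.contains g t2) =
      ((pvSkillToGroup.get? t1).isSome && (pvSkillToGroup.get? t1 == pvSkillToGroup.get? t2)) := by
  by_cases h1 : t1 ∈ pvAllSkills
  · by_cases h2 : t2 ∈ pvAllSkills
    · fin_cases h1 <;> fin_cases h2 <;> decide
    · rw [pv_notin_any' t1 t2 h2, pv_notin_get? t2 h2]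
      fin_cases h1 <;> decide
  · rw [pv_notin_any t1 t2 h1, pv_notin_get? t1 h1]
    rfl

theorem pv_main (skill1 skill2 : String) :
    are_skills_related_py skill1 skill2 = are_skills_related_py_alt skill1 skill2 := by
  show pvGroupLoop skill1 skill2 pvFrameworkGroups = _
  rw [pvGroupLoop_eq_any]
  exact pv_key (PySem.Str.lower skill1) (PySem.Str.lower skill2)

-- ===== VERDICT (by name: the statement is the Claim_ definition above) =====
theorem are_skills_related_py_spec : Claim_equal_are_skills_related_py := by
  intro s1 s2 _
  exact pv_main s1 s2
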